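-- pv_equiv track=rewrite | github.com/RatherRude/Elite-Dangerous-AI-Integration | StatusParser.py | translate_flags
-- ===== SOURCE A (Python) =====
-- def translate_flags(flags_value):
--     """Translates flags integer to a dictionary of only True flags."""
--     all_flags = {
--         "Docked": bool(flags_value & 1),
--         "Landed": bool(flags_value & 2),
--         "Landing Gear Down": bool(flags_value & 4),
--         "Shields Up": bool(flags_value & 8),
--         "Supercruise": bool(flags_value & 16),
--         "FlightAssist Off": bool(flags_value & 32),
--         "Hardpoints Deployed": bool(flags_value & 64),
--         "In Wing": bool(flags_value & 128),
--         "Lights On": bool(flags_value & 256),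
--         "Cargo Scoop Deployed": bool(flags_value & 512),
--         "Silent Running": bool(flags_value & 1024),
--         "Scooping Fuel": bool(flags_value & 2048),
--         "Srv Handbrake": bool(flags_value & 4096),
--         "Srv using Turret view": bool(flags_value & 8192),
--         "Srv Turret retracted (close to ship)": bool(flags_value & 16384),
--         "Srv DriveAssist": bool(flags_value & 32768),
--         "Fsd MassLocked": bool(flags_value & 65536),
--         "Fsd Charging": bool(flags_value & 131072),
--         "Fsd Cooldown": bool(flags_value & 262144),
--         "Low Fuel (< 25%)": bool(flags_value & 524288),
--         "Over Heating (> 100%)": bool(flags_value & 1048576),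
--         "Has Lat Long": bool(flags_value & 2097152),
--         "IsInDanger": bool(flags_value & 4194304),
--         "Being Interdicted": bool(flags_value & 8388608),
--         "In MainShip": bool(flags_value & 16777216),
--         "In Fighter": bool(flags_value & 33554432),
--         "In SRV": bool(flags_value & 67108864),
--         "Hud in Analysis mode": bool(flags_value & 134217728),
--         "Night Vision": bool(flags_value & 268435456),
--         "Altitude from Average radius": bool(flags_value & 536870912),
--         "Fsd Jump": bool(flags_value & 1073741824),
--         "Srv HighBeam": bool(flags_value & 2147483648),
--     }
--
--     # Return only flags that are True
--     true_flags = {key: value for key, value in all_flags.items() if value}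
--     return true_flags
-- ===== SOURCE B (Python) =====
-- FLAG_NAMES = [
--     "Docked", "Landed", "Landing Gear Down", "Shields Up", "Supercruise",
--     "FlightAssist Off", "Hardpoints Deployed", "In Wing", "Lights On",
--     "Cargo Scoop Deployed", "Silent Running", "Scooping Fuel", "Srv Handbrake",
--     "Srv using Turret view", "Srv Turret retracted (close to ship)",
--     "Srv DriveAssist", "Fsd MassLocked", "Fsd Charging", "Fsd Cooldown",
--     "Low Fuel (< 25%)", "Over Heating (> 100%)", "Has Lat Long", "IsInDanger",
--     "Being Interdicted", "In MainShip", "In Fighter", "In SRV",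
--     "Hud in Analysis mode", "Night Vision", "Altitude from Average radius",
--     "Fsd Jump", "Srv HighBeam",
-- ]
--
-- def _decode(v, names):
--     """Recursively peel off the binary expansion of v, pairing bits with names.
--     Stops as soon as no bits (or names) are left."""
--     if v == 0 or not names:
--         return {}
--     rest = _decode(v >> 1, names[1:])
--     if v & 1:
--         return {names[0]: True, **rest}
--     return rest
--
-- def translate_flags(flags_value):
--     """Translates flags integer to a dictionary of only True flags."""
--     return _decode(flags_value & 0xFFFFFFFF, FLAG_NAMES)
-- ===== Notes on version B (the rewrite author's own statement) =====
-- stated objective: alternative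
-- what changed: Instead of testing thirty-two hardcoded masks and filtering, B masks the value once and recursively peels its binary expansion (halving, low-bit test) in lockstep with a name table, stopping as soon as no bits are left and emitting only the set flags.
import Mathlib
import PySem

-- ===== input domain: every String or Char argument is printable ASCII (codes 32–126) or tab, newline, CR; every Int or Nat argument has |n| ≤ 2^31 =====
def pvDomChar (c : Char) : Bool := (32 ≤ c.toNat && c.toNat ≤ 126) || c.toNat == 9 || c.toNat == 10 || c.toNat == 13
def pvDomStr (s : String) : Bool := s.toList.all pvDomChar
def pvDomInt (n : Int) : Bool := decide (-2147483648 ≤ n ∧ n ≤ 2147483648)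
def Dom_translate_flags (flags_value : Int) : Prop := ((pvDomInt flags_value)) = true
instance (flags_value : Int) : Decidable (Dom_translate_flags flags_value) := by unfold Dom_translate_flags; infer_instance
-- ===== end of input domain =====

-- B masks the value once and recursively peels its binary expansion (halving, low-bit test)
-- in lockstep with a name table, instead of A's 32 hardcoded mask tests plus a filtering pass (alternative).

-- ===== PORT A =====
-- A builds a dict of all 32 flags (keys distinct, insertion order), then keeps the True ones.
def translate_flags (flags_value : Int) : List (String × Bool) :=
  let all_flags : List (String × Bool) :=
    [ ("Docked", decide (PySem.Int.band flags_value 1 ≠ 0)),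
      ("Landed", decide (PySem.Int.band flags_value 2 ≠ 0)),
      ("Landing Gear Down", decide (PySem.Int.band flags_value 4 ≠ 0)),
      ("Shields Up", decide (PySem.Int.band flags_value 8 ≠ 0)),
      ("Supercruise", decide (PySem.Int.band flags_value 16 ≠ 0)),
      ("FlightAssist Off", decide (PySem.Int.band flags_value 32 ≠ 0)),
      ("Hardpoints Deployed", decide (PySem.Int.band flags_value 64 ≠ 0)),
      ("In Wing", decide (PySem.Int.band flags_value 128 ≠ 0)),
      ("Lights On", decide (PySem.Int.band flags_value 256 ≠ 0)),
      ("Cargo Scoop Deployed", decide (PySem.Int.band flags_value 512 ≠ 0)),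
      ("Silent Running", decide (PySem.Int.band flags_value 1024 ≠ 0)),
      ("Scooping Fuel", decide (PySem.Int.band flags_value 2048 ≠ 0)),
      ("Srv Handbrake", decide (PySem.Int.band flags_value 4096 ≠ 0)),
      ("Srv using Turret view", decide (PySem.Int.band flags_value 8192 ≠ 0)),
      ("Srv Turret retracted (close to ship)", decide (PySem.Int.band flags_value 16384 ≠ 0)),
      ("Srv DriveAssist", decide (PySem.Int.band flags_value 32768 ≠ 0)),
      ("Fsd MassLocked", decide (PySem.Int.band flags_value 65536 ≠ 0)),
      ("Fsd Charging", decide (PySem.Int.band flags_value 131072 ≠ 0)),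
      ("Fsd Cooldown", decide (PySem.Int.band flags_value 262144 ≠ 0)),
      ("Low Fuel (< 25%)", decide (PySem.Int.band flags_value 524288 ≠ 0)),
      ("Over Heating (> 100%)", decide (PySem.Int.band flags_value 1048576 ≠ 0)),
      ("Has Lat Long", decide (PySem.Int.band flags_value 2097152 ≠ 0)),
      ("IsInDanger", decide (PySem.Int.band flags_value 4194304 ≠ 0)),
      ("Being Interdicted", decide (PySem.Int.band flags_value 8388608 ≠ 0)),
      ("In MainShip", decide (PySem.Int.band flags_value 16777216 ≠ 0)),
      ("In Fighter", decide (PySem.Int.band flags_value 33554432 ≠ 0)),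
      ("In SRV", decide (PySem.Int.band flags_value 67108864 ≠ 0)),
      ("Hud in Analysis mode", decide (PySem.Int.band flags_value 134217728 ≠ 0)),
      ("Night Vision", decide (PySem.Int.band flags_value 268435456 ≠ 0)),
      ("Altitude from Average radius", decide (PySem.Int.band flags_value 536870912 ≠ 0)),
      ("Fsd Jump", decide (PySem.Int.band flags_value 1073741824 ≠ 0)),
      ("Srv HighBeam", decide (PySem.Int.band flags_value 2147483648 ≠ 0)) ]
  all_flags.filter (fun p => p.2)

-- ===== PORT B =====
def FLAG_NAMES : List String :=
  [ "Docked", "Landed", "Landing Gear Down", "Shields Up", "Supercruise",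
    "FlightAssist Off", "Hardpoints Deployed", "In Wing", "Lights On",
    "Cargo Scoop Deployed", "Silent Running", "Scooping Fuel", "Srv Handbrake",
    "Srv using Turret view", "Srv Turret retracted (close to ship)",
    "Srv DriveAssist", "Fsd MassLocked", "Fsd Charging", "Fsd Cooldown",
    "Low Fuel (< 25%)", "Over Heating (> 100%)", "Has Lat Long", "IsInDanger",
    "Being Interdicted", "In MainShip", "In Fighter", "In SRV",
    "Hud in Analysis mode", "Night Vision", "Altitude from Average radius",
    "Fsd Jump", "Srv HighBeam" ]

/-- Source B's `_decode`: peel the binary expansion of `v` (`v >> 1`, `v & 1`) along the name list,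
stopping as soon as `v == 0` (or names run out); dict-merge `{names[0]: True, **rest}` is a cons
because the names are distinct. -/
def decodeFlags (v : Int) : List String → List (String × Bool)
  | [] => []
  | n :: rest =>
    if v = 0 then []
    else
      let restOut := decodeFlags (v >>> (1 : Int)) rest
      if PySem.Int.band v 1 ≠ 0 then (n, true) :: restOut else restOut

def translate_flags_alt (flags_value : Int) : List (String × Bool) :=
  decodeFlags (PySem.Int.band flags_value 4294967295) FLAG_NAMES

-- ===== PRECONDITION & SPEC =====
def Spec_translate_flags (flags_value : Int) (out : List (String × Bool)) : Prop := out = translate_flags_alt flags_value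
instance (flags_value : Int) (out : List (String × Bool)) : Decidable (Spec_translate_flags flags_value out) := by unfold Spec_translate_flags; infer_instance

-- ===== CLAIM =====
def Claim_equal_translate_flags : Prop := ∀ (flags_value : Int), Dom_translate_flags flags_value → Spec_translate_flags flags_value (translate_flags flags_value)

-- ===== LEMMAS AND PROOFS =====

/-- Proof-side normal form of B's loop: no early exit, bit i read as `m / 2^i % 2`. -/
def bitsFilter : Nat → List String → List (String × Bool)
  | _, [] => []
  | m, n :: rest => (if m % 2 = 1 then [(n, true)] else []) ++ bitsFilter (m / 2) rest

lemma bitsFilter_zero (names : List String) : bitsFilter 0 names = [] := by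
  induction names with
  | nil => rfl
  | cons n rest ih => simp [bitsFilter, ih]

/-- B's early-exit recursion agrees with the exit-free normal form on nonnegative values. -/
lemma decodeFlags_eq_bitsFilter (names : List String) : ∀ m : Nat,
    decodeFlags (↑m : Int) names = bitsFilter m names := by
  induction names with
  | nil => intro m; rfl
  | cons n rest ih =>
    intro m
    by_cases hm : m = 0
    · subst hm; simp [decodeFlags, bitsFilter_zero]
    · have hcast : ((↑m : Int)) ≠ 0 := by exact_mod_cast hm
      have hshift : (↑m : Int) >>> (1 : Int) = ↑(m / 2) := by
        exact Int.mem_toNat?.mp rfl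
      have hband : PySem.Int.band (↑m) 1 = ↑(m &&& 1) := PySem.Int.band_natCast m 1
      simp only [decodeFlags, bitsFilter, if_neg hcast, hshift, ih, hband, Nat.and_one_is_mod]
      by_cases h2 : m % 2 = 1
      · simp [h2]
      · simp only [if_neg h2]
        have h0 : m % 2 = 0 := by omega
        simp [h0]

/-- A's filtering of (name, bool) pairs written as concatenation of per-entry segments. -/
lemma filter_eq_flatMap (l : List (String × Bool)) :
    l.filter (fun p => p.2) = l.flatMap (fun p => if p.2 then [(p.1, true)] else []) := by
  induction l with
  | nil => rfl
  | cons hd tl ih =>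
    rcases hd with ⟨n, b⟩
    cases b <;> simp [List.flatMap_cons, ih]

/-- Complement-within-32-bit-mask flips each low bit. -/
lemma testBit_mask_sub (x i : Nat) (h : x < 2^32) (hi : i < 32) :
    (2^32 - 1 - x).testBit i = !x.testBit i := by
  have hv : (BitVec.ofNat 32 x).toNat = x := by
    simp [BitVec.toNat_ofNat]; omega
  have h1 : (~~~(BitVec.ofNat 32 x)).toNat = 2^32 - 1 - x := by
    rw [BitVec.toNat_not, hv]
  rw [← h1]
  have := BitVec.getLsbD_not (x := BitVec.ofNat 32 x) (i := i)
  simp [BitVec.getLsbD, hv] at this ⊢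
  simp [this, hi]

/-- Bit i of Python's `f & (1 << i)` test equals bit i of the 32-bit-masked value. -/
lemma bitCond (f : Int) (i : Nat) (hi : i < 32) :
    decide (PySem.Int.band f ((2:Int)^i) ≠ 0)
      = decide ((PySem.Int.band f 4294967295).toNat / 2^i % 2 = 1) := by
  have hpowcast : ((2:Int)^i) = ((2^i : Nat) : Int) := by push_cast; ring
  rw [decide_eq_decide]
  by_cases hf : 0 ≤ f
  · rw [hpowcast, show (4294967295 : Int) = ((4294967295 : Nat) : Int) from by norm_num,
        PySem.Int.band_of_nonneg hf (by positivity),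
        PySem.Int.band_of_nonneg hf (by norm_num)]
    simp only [Int.toNat_natCast]
    rw [Nat.and_two_pow_sub_one_eq_mod f.toNat 32, Nat.and_two_pow,
        show f.toNat % 2 ^ 32 / 2 ^ i % 2 = 1 ↔ (f.toNat % 2^32).testBit i = true from by
          rw [Nat.testBit_eq_decide_div_mod_eq]; simp,
        Nat.testBit_mod_two_pow]
    cases h : f.toNat.testBit i <;> simp [hi]
  · have hb1 : PySem.Int.band f ((2:Int)^i) = ((2^i - ((-f-1).toNat &&& 2^i) : Nat) : Int) := by
      rw [PySem.Int.band, if_neg (by omega), if_pos (by positivity), hpowcast]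
      rw [Int.toNat_natCast, Nat.and_comm]
    have hb2 : PySem.Int.band f 4294967295
        = (((2^32 - 1) - ((-f-1).toNat &&& (2^32 - 1)) : Nat) : Int) := by
      rw [PySem.Int.band, if_neg (by omega), if_pos (by norm_num)]
      rw [show Int.toNat 4294967295 = 2^32 - 1 from rfl, Nat.and_comm]
    rw [hb1, hb2]
    simp only [ne_eq, Int.natCast_eq_zero, Int.toNat_natCast]
    set nf : Nat := (-f - 1).toNat with hnf
    rw [Nat.and_two_pow_sub_one_eq_mod nf 32, Nat.and_two_pow,
        show (2^32 - 1 - nf % 2^32) / 2 ^ i % 2 = 1 ↔ (2^32 - 1 - nf % 2^32).testBit i = true from by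
          rw [Nat.testBit_eq_decide_div_mod_eq]; simp]
    have hlt : nf % 2^32 < 2^32 := Nat.mod_lt _ (by norm_num)
    rw [testBit_mask_sub (nf % 2^32) i hlt hi, Nat.testBit_mod_two_pow]
    cases h : nf.testBit i <;> simp [hi]

-- ===== VERDICT =====
theorem translate_flags_spec : Claim_equal_translate_flags := by
  intro f _
  show translate_flags f = translate_flags_alt f
  have h0 : 0 ≤ PySem.Int.band f 4294967295 := by
    rw [PySem.Int.band_comm]
    exact PySem.Int.band_nonneg_of_nonneg_left f (by norm_num)
  have hm : PySem.Int.band f 4294967295 = ↑(PySem.Int.band f 4294967295).toNat :=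
    (Int.toNat_of_nonneg h0).symm
  rw [translate_flags_alt]
  rw [hm, decodeFlags_eq_bitsFilter]
  have e0 : decide (PySem.Int.band f 1 ≠ 0) = decide ((PySem.Int.band f 4294967295).toNat % 2 = 1) := by
    simpa using bitCond f 0 (by norm_num)
  have e1 : decide (PySem.Int.band f 2 ≠ 0) = decide ((PySem.Int.band f 4294967295).toNat / 2 % 2 = 1) := by
    simpa using bitCond f 1 (by norm_num)
  have e2 : decide (PySem.Int.band f 4 ≠ 0) = decide ((PySem.Int.band f 4294967295).toNat / 4 % 2 = 1) := by
    simpa using bitCond f 2 (by norm_num)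
  have e3 : decide (PySem.Int.band f 8 ≠ 0) = decide ((PySem.Int.band f 4294967295).toNat / 8 % 2 = 1) := by
    simpa using bitCond f 3 (by norm_num)
  have e4 : decide (PySem.Int.band f 16 ≠ 0) = decide ((PySem.Int.band f 4294967295).toNat / 16 % 2 = 1) := by
    simpa using bitCond f 4 (by norm_num)
  have e5 : decide (PySem.Int.band f 32 ≠ 0) = decide ((PySem.Int.band f 4294967295).toNat / 32 % 2 = 1) := by
    simpa using bitCond f 5 (by norm_num)
  have e6 : decide (PySem.Int.band f 64 ≠ 0) = decide ((PySem.Int.band f 4294967295).toNat / 64 % 2 = 1) := by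
    simpa using bitCond f 6 (by norm_num)
  have e7 : decide (PySem.Int.band f 128 ≠ 0) = decide ((PySem.Int.band f 4294967295).toNat / 128 % 2 = 1) := by
    simpa using bitCond f 7 (by norm_num)
  have e8 : decide (PySem.Int.band f 256 ≠ 0) = decide ((PySem.Int.band f 4294967295).toNat / 256 % 2 = 1) := by
    simpa using bitCond f 8 (by norm_num)
  have e9 : decide (PySem.Int.band f 512 ≠ 0) = decide ((PySem.Int.band f 4294967295).toNat / 512 % 2 = 1) := by
    simpa using bitCond f 9 (by norm_num)
  have e10 : decide (PySem.Int.band f 1024 ≠ 0) = decide ((PySem.Int.band f 4294967295).toNat / 1024 % 2 = 1) := by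
    simpa using bitCond f 10 (by norm_num)
  have e11 : decide (PySem.Int.band f 2048 ≠ 0) = decide ((PySem.Int.band f 4294967295).toNat / 2048 % 2 = 1) := by
    simpa using bitCond f 11 (by norm_num)
  have e12 : decide (PySem.Int.band f 4096 ≠ 0) = decide ((PySem.Int.band f 4294967295).toNat / 4096 % 2 = 1) := by
    simpa using bitCond f 12 (by norm_num)
  have e13 : decide (PySem.Int.band f 8192 ≠ 0) = decide ((PySem.Int.band f 4294967295).toNat / 8192 % 2 = 1) := by
    simpa using bitCond f 13 (by norm_num)
  have e14 : decide (PySem.Int.band f 16384 ≠ 0) = decide ((PySem.Int.band f 4294967295).toNat / 16384 % 2 = 1) := by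
    simpa using bitCond f 14 (by norm_num)
  have e15 : decide (PySem.Int.band f 32768 ≠ 0) = decide ((PySem.Int.band f 4294967295).toNat / 32768 % 2 = 1) := by
    simpa using bitCond f 15 (by norm_num)
  have e16 : decide (PySem.Int.band f 65536 ≠ 0) = decide ((PySem.Int.band f 4294967295).toNat / 65536 % 2 = 1) := by
    simpa using bitCond f 16 (by norm_num)
  have e17 : decide (PySem.Int.band f 131072 ≠ 0) = decide ((PySem.Int.band f 4294967295).toNat / 131072 % 2 = 1) := by
    simpa using bitCond f 17 (by norm_num)
  have e18 : decide (PySem.Int.band f 262144 ≠ 0) = decide ((PySem.Int.band f 4294967295).toNat / 262144 % 2 = 1) := by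
    simpa using bitCond f 18 (by norm_num)
  have e19 : decide (PySem.Int.band f 524288 ≠ 0) = decide ((PySem.Int.band f 4294967295).toNat / 524288 % 2 = 1) := by
    simpa using bitCond f 19 (by norm_num)
  have e20 : decide (PySem.Int.band f 1048576 ≠ 0) = decide ((PySem.Int.band f 4294967295).toNat / 1048576 % 2 = 1) := by
    simpa using bitCond f 20 (by norm_num)
  have e21 : decide (PySem.Int.band f 2097152 ≠ 0) = decide ((PySem.Int.band f 4294967295).toNat / 2097152 % 2 = 1) := by
    simpa using bitCond f 21 (by norm_num)
  have e22 : decide (PySem.Int.band f 4194304 ≠ 0) = decide ((PySem.Int.band f 4294967295).toNat / 4194304 % 2 = 1) := by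
    simpa using bitCond f 22 (by norm_num)
  have e23 : decide (PySem.Int.band f 8388608 ≠ 0) = decide ((PySem.Int.band f 4294967295).toNat / 8388608 % 2 = 1) := by
    simpa using bitCond f 23 (by norm_num)
  have e24 : decide (PySem.Int.band f 16777216 ≠ 0) = decide ((PySem.Int.band f 4294967295).toNat / 16777216 % 2 = 1) := by
    simpa using bitCond f 24 (by norm_num)
  have e25 : decide (PySem.Int.band f 33554432 ≠ 0) = decide ((PySem.Int.band f 4294967295).toNat / 33554432 % 2 = 1) := by
    simpa using bitCond f 25 (by norm_num)
  have e26 : decide (PySem.Int.band f 67108864 ≠ 0) = decide ((PySem.Int.band f 4294967295).toNat / 67108864 % 2 = 1) := by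
    simpa using bitCond f 26 (by norm_num)
  have e27 : decide (PySem.Int.band f 134217728 ≠ 0) = decide ((PySem.Int.band f 4294967295).toNat / 134217728 % 2 = 1) := by
    simpa using bitCond f 27 (by norm_num)
  have e28 : decide (PySem.Int.band f 268435456 ≠ 0) = decide ((PySem.Int.band f 4294967295).toNat / 268435456 % 2 = 1) := by
    simpa using bitCond f 28 (by norm_num)
  have e29 : decide (PySem.Int.band f 536870912 ≠ 0) = decide ((PySem.Int.band f 4294967295).toNat / 536870912 % 2 = 1) := by
    simpa using bitCond f 29 (by norm_num)
  have e30 : decide (PySem.Int.band f 1073741824 ≠ 0) = decide ((PySem.Int.band f 4294967295).toNat / 1073741824 % 2 = 1) := by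
    simpa using bitCond f 30 (by norm_num)
  have e31 : decide (PySem.Int.band f 2147483648 ≠ 0) = decide ((PySem.Int.band f 4294967295).toNat / 2147483648 % 2 = 1) := by
    simpa using bitCond f 31 (by norm_num)
  rw [translate_flags, filter_eq_flatMap]
  simp only [List.flatMap_cons, List.flatMap_nil, List.append_nil,
    FLAG_NAMES, bitsFilter, Nat.div_div_eq_div_mul, Nat.reduceMul]
  simp only [e0,e1,e2,e3,e4,e5,e6,e7,e8,e9,e10,e11,e12,e13,e14,e15,e16,e17,e18,e19,e20,e21,e22,e23,e24,e25,e26,e27,e28,e29,e30,e31, decide_eq_true_eq]
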